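-- pv_equiv track=rewrite | github.com/tfunk1030/IOptimal | solver/bmw_rotation_search.py | _adjacent_labels
-- ===== SOURCE A (Python) =====
-- from typing import TYPE_CHECKING, Any
--
-- def _size_index(labels: list[str], value: Any) -> int:
--     if value in labels:
--         return labels.index(value)
--     return 0
--
-- def _adjacent_labels(labels: list[str], value: Any) -> list[str]:
--     if not labels:
--         return []
--     idx = _size_index(labels, value)
--     allowed = {idx}
--     if idx > 0:
--         allowed.add(idx - 1)
--     if idx < len(labels) - 1:
--         allowed.add(idx + 1)
--     return [labels[i] for i in sorted(allowed)]
-- ===== SOURCE B (Python) =====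
-- def _adjacent_labels(labels, value):
--     idx = labels.index(value) if value in labels else 0
--     return labels[max(0, idx - 1): idx + 2]
-- ===== Notes on version B (the rewrite author's own statement) =====
-- stated objective: simpler
-- what changed: Replaces A's set-of-indices construction with conditionals plus a sort-and-index list comprehension by a single contiguous slice labels[max(0, idx-1): idx+2].
import Mathlib
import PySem

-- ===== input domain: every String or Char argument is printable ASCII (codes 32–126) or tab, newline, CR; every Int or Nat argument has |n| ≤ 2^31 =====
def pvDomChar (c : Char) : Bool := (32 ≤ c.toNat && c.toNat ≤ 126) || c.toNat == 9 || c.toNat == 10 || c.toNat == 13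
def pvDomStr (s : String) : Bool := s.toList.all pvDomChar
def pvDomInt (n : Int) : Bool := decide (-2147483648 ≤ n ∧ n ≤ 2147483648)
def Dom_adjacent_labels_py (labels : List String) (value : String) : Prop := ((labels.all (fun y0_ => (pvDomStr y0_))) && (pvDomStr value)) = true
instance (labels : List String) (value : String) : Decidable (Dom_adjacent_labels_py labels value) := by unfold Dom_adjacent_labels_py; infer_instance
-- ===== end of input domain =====

-- B replaces A's conditional index-set + sort + comprehension by one contiguous slice; objective: simpler.

-- ===== PORT A =====
-- helper _size_index: 'labels.index(value) if value in labels else 0'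
def size_index_py (labels : List String) (value : String) : Int :=
  if value ∈ labels then ((PySem.List.index? labels value).getD 0 : Nat) else 0

def adjacent_labels_py (labels : List String) (value : String) : List String :=
  if labels = [] then []
  else
    let idx : Int := size_index_py labels value
    let allowed : PySem.Set Int := PySem.Set.ofList [idx]
    let allowed := if idx > 0 then PySem.Set.add allowed (idx - 1) else allowed
    let allowed := if idx < (labels.length : Int) - 1 then PySem.Set.add allowed (idx + 1) else allowed
    -- labels[i] for i in sorted(allowed); every i is in range, so the pyGetD default is never used
    (PySem.List.sorted allowed (fun x => x) false).map (fun i => PySem.List.pyGetD labels i "")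

-- ===== PORT B =====
def adjacent_labels_py_alt (labels : List String) (value : String) : List String :=
  let idx : Int := if value ∈ labels then ((PySem.List.index? labels value).getD 0 : Nat) else 0
  PySem.List.slice labels (some (max 0 (idx - 1))) (some (idx + 2))

-- ===== PRECONDITION & SPEC =====
def Spec_adjacent_labels_py (labels : List String) (value : String) (out : List String) : Prop := out = adjacent_labels_py_alt labels value
instance (labels : List String) (value : String) (out : List String) : Decidable (Spec_adjacent_labels_py labels value out) := by unfold Spec_adjacent_labels_py; infer_instance

-- ===== CLAIM (what is proved, stated in full; the proofs are below) =====
def Claim_equal_adjacent_labels_py : Prop := ∀ (labels : List String) (value : String), Dom_adjacent_labels_py labels value → Spec_adjacent_labels_py labels value (adjacent_labels_py labels value)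

-- ===== LEMMAS AND PROOFS =====

-- a contiguous window of a list, written as a map of getD over the window's indices
lemma pv_window (xs : List String) (a m : Nat) :
    (xs.drop a).take m = (List.range' a (min m (xs.length - a))).map (fun j => xs.getD j "") := by
  apply List.ext_getElem
  · simp
  · intro n h1 h2
    have hn : a + n < xs.length := by simp at h1; omega
    simp [List.getElem_take, List.getElem_drop, List.getElem_range', List.getD_eq_getElem?_getD,
      List.getElem?_eq_getElem hn]

-- A's set-build, sort and index with a valid index i equals B's slice
lemma pv_core (xs : List String) (i : Nat) (h : i < xs.length) :
    (PySem.List.sorted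
      (let allowed : PySem.Set Int := PySem.Set.ofList [(i : Int)]
       let allowed := if (i : Int) > 0 then PySem.Set.add allowed ((i : Int) - 1) else allowed
       if (i : Int) < (xs.length : Int) - 1 then PySem.Set.add allowed ((i : Int) + 1) else allowed)
      (fun x => x) false).map (fun j => PySem.List.pyGetD xs j "")
    = PySem.List.slice xs (some (max 0 ((i : Int) - 1))) (some ((i : Int) + 2)) := by
  have hofl : PySem.Set.ofList [(i:Int)] = [(i:Int)] := by
    simp [PySem.Set.ofList, PySem.Set.add, PySem.Set.empty, PySem.Set.contains]
  have hg : ∀ n : Nat, PySem.List.pyGetD xs (n:Int) "" = xs.getD n "" := by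
    intro n; simp [pysem]
  simp only [hofl]
  by_cases hpos : (i:Int) > 0
  · have hi1 : (i:Int) - 1 = ((i-1 : Nat) : Int) := by omega
    have hi1' : (i:Int) + 1 = ((i+1 : Nat) : Int) := by omega
    have hmax : max (0:Int) ((i:Int)-1) = ((i-1 : Nat) : Int) := by omega
    have hi2 : (i:Int) + 2 = ((i+2 : Nat) : Int) := by omega
    have hadd1 : PySem.Set.add [(i:Int)] ((i:Int)-1) = [(i:Int), (i:Int)-1] := by
      simp [PySem.Set.add, PySem.Set.contains]
    rw [if_pos hpos, hadd1, hmax, hi2, PySem.List.slice_natCast, pv_window]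
    by_cases h2 : (i:Int) < (xs.length : Int) - 1
    · have hmin : min (i+2-(i-1)) (xs.length - (i-1)) = 3 := by omega
      rw [if_pos h2, hmin]
      have hadd2 : PySem.Set.add [(i:Int), (i:Int)-1] ((i:Int)+1) = [(i:Int), (i:Int)-1, (i:Int)+1] := by
        simp [PySem.Set.add, PySem.Set.contains]; omega
      have hs : PySem.List.sorted [(i:Int), (i:Int)-1, (i:Int)+1] (fun x => x) false
          = [(i:Int)-1, (i:Int), (i:Int)+1] :=
        PySem.List.sorted_eq_of_perm_of_pairwise_lt _ _ _ (List.Perm.swap _ _ _) (by simp)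
      have hr : List.range' (i-1) 3 = [i-1, i, i+1] := by
        simp [List.range']; omega
      rw [hadd2, hs, hr]
      simp only [List.map_cons, List.map_nil, hi1, hi1', hg]
    · have hlen : xs.length = i + 1 := by omega
      have hmin : min (i+2-(i-1)) (xs.length - (i-1)) = 2 := by omega
      rw [if_neg h2, hmin]
      have hs : PySem.List.sorted [(i:Int), (i:Int)-1] (fun x => x) false
          = [(i:Int)-1, (i:Int)] :=
        PySem.List.sorted_eq_of_perm_of_pairwise_lt _ _ _ (List.Perm.swap _ _ _) (by simp)
      have hr : List.range' (i-1) 2 = [i-1, i] := by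
        simp [List.range']; omega
      rw [hs, hr]
      simp only [List.map_cons, List.map_nil, hi1, hg]
  · have hi0 : i = 0 := by omega
    subst hi0
    have hmax : max (0:Int) ((0:Nat) - 1) = ((0 : Nat) : Int) := by simp
    have hi2 : ((0:Nat):Int) + 2 = ((2 : Nat) : Int) := by norm_num
    rw [if_neg hpos, hmax, hi2, PySem.List.slice_natCast, pv_window]
    by_cases h2 : ((0:Nat):Int) < (xs.length : Int) - 1
    · have hmin : min (2-0) (xs.length - 0) = 2 := by omega
      rw [if_pos h2, hmin]
      have hadd2 : PySem.Set.add [((0:Nat):Int)] (((0:Nat):Int)+1) = [((0:Nat):Int), ((0:Nat):Int)+1] := by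
        simp [PySem.Set.add, PySem.Set.contains]
      have hs : PySem.List.sorted [((0:Nat):Int), ((0:Nat):Int)+1] (fun x => x) false
          = [((0:Nat):Int), ((0:Nat):Int)+1] := by
        apply PySem.List.sorted_eq_self_of_pairwise
        simp
      have hr : List.range' 0 2 = [0, 1] := by simp [List.range']
      rw [hadd2, hs, hr]
      have h01 : ((0:Nat):Int) + 1 = ((1:Nat):Int) := by norm_num
      simp only [List.map_cons, List.map_nil, h01, hg]
    · have hmin : min (2-0) (xs.length - 0) = 1 := by omega
      rw [if_neg h2, hmin]
      have hs : PySem.List.sorted [((0:Nat):Int)] (fun x => x) false = [((0:Nat):Int)] := by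
        apply PySem.List.sorted_eq_self_of_pairwise
        simp
      have hr : List.range' 0 1 = [0] := by simp [List.range']
      rw [hs, hr]
      simp only [List.map_cons, List.map_nil, hg]

-- ===== VERDICT (by name: the statement is the Claim_ definition above) =====
theorem adjacent_labels_py_spec : Claim_equal_adjacent_labels_py := by
  intro labels value _
  unfold Spec_adjacent_labels_py adjacent_labels_py adjacent_labels_py_alt size_index_py
  by_cases hnil : labels = []
  · subst hnil; simp [PySem.List.slice_to]
  · simp only [if_neg hnil]
    by_cases hmem : value ∈ labels
    · obtain ⟨k, hk⟩ := Option.isSome_iff_exists.mp ((PySem.List.index?_isSome_iff labels value).2 hmem)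
      obtain ⟨hklt, -, -⟩ := PySem.List.getElem_of_index?_eq_some hk
      simp only [if_pos hmem, hk, Option.getD_some]
      exact pv_core labels k hklt
    · simp only [if_neg hmem]
      have h0 : 0 < labels.length := List.length_pos_iff.mpr hnil
      exact_mod_cast pv_core labels 0 h0
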